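-- pv_equiv track=rewrite | github.com/uranushq/skybrush-server | src/flockwave/server/ext/path_planner/converter.py | _collapse_stationary
-- ===== SOURCE A (Python) =====
-- from typing import Dict, List, Optional, Tuple
--
-- def _collapse_stationary(points: List[list]) -> List[list]:
--     """Remove consecutive keyframes with identical positions.
--
--     When a drone sits still for multiple steps the algorithm records the
--     same (x, y, z) repeatedly.  We collapse those into a single pair of
--     keyframes (enter + exit) so the trajectory keeps its timing but the
--     encoder produces a compact *constant* segment instead of many tiny
--     linear segments with zero displacement.
--
--     The first and last keyframe are always kept.
--     """
--     if len(points) <= 2: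
--         return points
--
--     collapsed: List[list] = [points[0]]
--
--     i = 1
--     while i < len(points):
--         # Look ahead: is the position the same as the previous kept point?
--         prev_pos = collapsed[-1][1]
--         cur_pos = points[i][1]
--
--         if cur_pos == prev_pos:
--             # Skip ahead to the last frame with this same position
--             j = i
--             while j + 1 < len(points) and points[j + 1][1] == cur_pos:
--                 j += 1
--             # Keep only the exit keyframe (or the final point)
--             collapsed.append(points[j])
--             i = j + 1
--         else:
--             collapsed.append(points[i])
--             i += 1
--
--     return collapsed
-- ===== SOURCE B (Python) =====
-- def _collapse_stationary(points):
--     if len(points) <= 2: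
--         return points
--     n = len(points)
--     return [
--         points[k]
--         for k in range(n)
--         if k == 0
--         or points[k][1] != points[k - 1][1]
--         or k == n - 1
--         or points[k][1] != points[k + 1][1]
--     ]
-- ===== Notes on version B (the rewrite author's own statement) =====
-- stated objective: simpler
-- what changed: replaces A's stateful while-loop (which tracks the last kept point and jumps over runs with an inner while) by a single flat pass that keeps each point that starts or ends a maximal run of equal positions
import Mathlib
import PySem

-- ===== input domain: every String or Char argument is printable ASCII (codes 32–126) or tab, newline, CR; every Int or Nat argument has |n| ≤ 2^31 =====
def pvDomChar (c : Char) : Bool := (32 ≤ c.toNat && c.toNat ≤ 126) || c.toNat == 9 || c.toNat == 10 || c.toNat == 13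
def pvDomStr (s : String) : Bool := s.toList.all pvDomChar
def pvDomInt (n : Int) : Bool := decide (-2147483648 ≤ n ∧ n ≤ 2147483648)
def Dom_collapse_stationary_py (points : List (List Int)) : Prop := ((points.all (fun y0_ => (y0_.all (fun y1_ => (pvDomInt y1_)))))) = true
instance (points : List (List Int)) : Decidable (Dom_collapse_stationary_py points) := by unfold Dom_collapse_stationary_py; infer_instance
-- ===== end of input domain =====

-- B replaces A's stateful while-loop (last-kept tracking + inner run-skipping) by one flat
-- pass keeping each point that starts or ends a maximal run of equal positions (objective:
-- simpler); return value only, neither version mutates its argument.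

-- ===== PORT A =====

-- point[1]; exact under Pre_ (every point accessed has length ≥ 2, so the index is in range)
def pvPos (p : List Int) : Int := p.getD 1 0

-- the inner while loop: skip ahead to the last frame with this same position
def pvSkipRun (points : List (List Int)) (cur : Int) (j : Nat) : Nat :=
  if _h : j + 1 < points.length ∧ pvPos (points.getD (j + 1) []) = cur then
    pvSkipRun points cur (j + 1)
  else j
termination_by points.length - j
decreasing_by omega

-- cited by pvALoop's decreasing_by
theorem pvSkipRun_ge (points : List (List Int)) (cur : Int) (j : Nat) :
    j ≤ pvSkipRun points cur j := by
  induction j using pvSkipRun.induct (points := points) (cur := cur) with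
  | case1 j h ih => rw [pvSkipRun, dif_pos h]; omega
  | case2 j h => rw [pvSkipRun, dif_neg h]

-- the outer while loop of A
def pvALoop (points : List (List Int)) (collapsed : List (List Int)) (i : Nat) :
    List (List Int) :=
  if h : i < points.length then
    let prev := pvPos (collapsed.getLastD [])
    let cur := pvPos (points.getD i [])
    if cur = prev then
      let j := pvSkipRun points cur i
      pvALoop points (collapsed ++ [points.getD j []]) (j + 1)
    else
      pvALoop points (collapsed ++ [points.getD i []]) (i + 1)
  else collapsed
termination_by points.length - i
decreasing_by
  · have := pvSkipRun_ge points (pvPos (points.getD i [])) i; omega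
  · omega

def collapse_stationary_py (points : List (List Int)) : List (List Int) :=
  if points.length ≤ 2 then points
  else pvALoop points [points.getD 0 []] 1

-- ===== PORT B =====

-- Source B's comprehension condition: k starts or ends a maximal run of equal positions
def pvKeep (points : List (List Int)) (k : Nat) : Bool :=
  k == 0 || pvPos (points.getD k []) != pvPos (points.getD (k - 1) [])
    || k == points.length - 1 || pvPos (points.getD k []) != pvPos (points.getD (k + 1) [])

def collapse_stationary_py_alt (points : List (List Int)) : List (List Int) :=
  if points.length ≤ 2 then points
  else ((List.range points.length).filter (pvKeep points)).map (fun k => points.getD k [])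

-- ===== PRECONDITION & SPEC =====
-- Pre_ excludes exactly the inputs on which the Python A raises IndexError: more than two
-- points and some point shorter than two entries (every point's [1] is read).  B raises the
-- same IndexError there.
def Pre_collapse_stationary_py (points : List (List Int)) : Prop :=
  points.length ≤ 2 ∨ ∀ p ∈ points, 2 ≤ p.length
instance (points : List (List Int)) : Decidable (Pre_collapse_stationary_py points) := by
  unfold Pre_collapse_stationary_py; infer_instance

def pvWitness_collapse_stationary_py : List (List Int) := [[0, 4], [1, 4], [2, 7]]

def Spec_collapse_stationary_py (points : List (List Int)) (out : List (List Int)) : Prop := out = collapse_stationary_py_alt points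
instance (points : List (List Int)) (out : List (List Int)) : Decidable (Spec_collapse_stationary_py points out) := by unfold Spec_collapse_stationary_py; infer_instance

-- ===== CLAIM (what is proved, stated in full; the proofs are below) =====
def Claim_equal_collapse_stationary_py : Prop := ∀ (points : List (List Int)), Dom_collapse_stationary_py points → Pre_collapse_stationary_py points → Spec_collapse_stationary_py points (collapse_stationary_py points)

-- ===== LEMMAS AND PROOFS =====

theorem pvSkipRun_lt (points : List (List Int)) (cur : Int) (j : Nat)
    (h : j < points.length) : pvSkipRun points cur j < points.length := by
  induction j using pvSkipRun.induct (points := points) (cur := cur) with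
  | case1 j h' ih => rw [pvSkipRun, dif_pos h']; exact ih h'.1
  | case2 j h' => rw [pvSkipRun, dif_neg h']; exact h

theorem pvSkipRun_run (points : List (List Int)) (cur : Int) (j : Nat) :
    ∀ m, j < m → m ≤ pvSkipRun points cur j → pvPos (points.getD m []) = cur := by
  induction j using pvSkipRun.induct (points := points) (cur := cur) with
  | case1 j h ih =>
    intro m h1 h2
    rw [pvSkipRun, dif_pos h] at h2
    rcases Nat.eq_or_lt_of_le (Nat.succ_le_of_lt h1) with heq | hlt
    · rw [← heq]; exact h.2
    · exact ih m hlt h2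
  | case2 j h =>
    intro m h1 h2
    rw [pvSkipRun, dif_neg h] at h2
    omega
theorem pvSkipRun_stop (points : List (List Int)) (cur : Int) (j : Nat) :
    ¬ (pvSkipRun points cur j + 1 < points.length ∧
        pvPos (points.getD (pvSkipRun points cur j + 1) []) = cur) := by
  induction j using pvSkipRun.induct (points := points) (cur := cur) with
  | case1 j h ih => rw [pvSkipRun, dif_pos h]; exact ih
  | case2 j h => rw [pvSkipRun, dif_neg h]; exact h

-- main invariant: from index i ≥ 1, with the last kept point carrying position P (i-1),
-- the loop appends exactly the pvKeep-filtered tail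
theorem pvALoop_eq (points : List (List Int)) :
    ∀ (d i : Nat) (c : List (List Int)), points.length - i ≤ d → 1 ≤ i →
      pvPos (c.getLastD []) = pvPos (points.getD (i - 1) []) →
      pvALoop points c i =
        c ++ ((List.range' i (points.length - i)).filter (pvKeep points)).map
          (fun k => points.getD k []) := by
  intro d
  induction d with
  | zero =>
    intro i c hd h1 hc
    have hni : points.length ≤ i := by omega
    rw [pvALoop, dif_neg (by omega)]
    simp [Nat.sub_eq_zero_of_le hni]
  | succ d ih =>
    intro i c hd h1 hc
    by_cases hi : i < points.length
    · rw [pvALoop, dif_pos hi]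
      set n := points.length with hn
      by_cases hcur : pvPos (points.getD i []) = pvPos (c.getLastD [])
      · -- run case
        simp only [if_pos hcur]
        set cur := pvPos (points.getD i []) with hcurdef
        set j := pvSkipRun points cur i with hj
        have hij : i ≤ j := pvSkipRun_ge points cur i
        have hjn : j < n := pvSkipRun_lt points cur i hi
        have hrun := pvSkipRun_run points cur i
        have hstop := pvSkipRun_stop points cur i
        -- position of every m with i ≤ m ≤ j is cur
        have hpos : ∀ m, i ≤ m → m ≤ j → pvPos (points.getD m []) = cur := by
          intro m hm1 hm2
          rcases Nat.eq_or_lt_of_le hm1 with heq | hlt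
          · rw [← heq]
          · exact hrun m hlt hm2
        have hprev : pvPos (points.getD (i - 1) []) = cur := by
          rw [← hc, hcur]
        have ihstep := ih (j + 1) (c ++ [points.getD j []])
          (by omega) (by omega)
          (by simp)
        rw [ihstep]
        -- split range' i (n - i) into [i..j] and [j+1..n)
        have hsplit : List.range' i (n - i) =
            List.range' i (j - i) ++ [j] ++ List.range' (j + 1) (n - (j + 1)) := by
          have e1 : List.range' i (j - i) ++ List.range' (i + 1 * (j - i)) 1 =
              List.range' i ((j - i) + 1) := List.range'_append
          have e2 : List.range' i ((j - i) + 1) ++ List.range' (i + 1 * ((j - i) + 1)) (n - (j + 1)) =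
              List.range' i (((j - i) + 1) + (n - (j + 1))) := List.range'_append
          have hji : i + 1 * (j - i) = j := by omega
          have hjj : i + 1 * ((j - i) + 1) = j + 1 := by omega
          have htot : ((j - i) + 1) + (n - (j + 1)) = n - i := by omega
          rw [hji] at e1
          rw [hjj, htot] at e2
          rw [← e2, ← e1]
          simp [List.range'_one]
        rw [hsplit]
        -- every m in [i, j) is dropped by pvKeep; j is kept
        have hdrop : ∀ m ∈ List.range' i (j - i), pvKeep points m = false := by
          intro m hm
          rw [List.mem_range'] at hm
          obtain ⟨t, ht1, ht2⟩ := hm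
          have hmi : i ≤ m := by omega
          have hmj : m < j := by omega
          have hm0 : (m == 0) = false := by simp; omega
          have hmn : (m == n - 1) = false := by simp; omega
          have h1' : pvPos (points.getD m []) = cur := hpos m hmi (by omega)
          have h2' : pvPos (points.getD (m - 1) []) = cur := by
            rcases Nat.eq_or_lt_of_le hmi with heq | hlt
            · rw [← heq]; exact hprev
            · exact hpos (m - 1) (by omega) (by omega)
          have h3' : pvPos (points.getD (m + 1) []) = cur := hpos (m + 1) (by omega) (by omega)
          simp only [List.getD] at h1' h2' h3'
          simp [pvKeep, hm0, h1', h2', h3']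
          omega
        have hkeepj : pvKeep points j = true := by
          rcases Nat.lt_or_ge (j + 1) n with hlt | hge
          · have hne : pvPos (points.getD (j + 1) []) ≠ cur := fun hcontra => hstop ⟨hlt, hcontra⟩
            have hjq : pvPos (points.getD j []) = cur := hpos j hij le_rfl
            simp only [List.getD] at hne hjq
            simp [pvKeep, hjq]
            exact Or.inr fun hc' => hne hc'.symm
          · have hjl : j = points.length - 1 := by omega
            simp [pvKeep, hjl]
        have hfa : List.filter (pvKeep points) (List.range' i (j - i)) = [] :=
          List.filter_eq_nil_iff.mpr (fun m hm => by simp [hdrop m hm])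
        rw [List.filter_append, List.filter_append, hfa]
        simp [hkeepj, List.append_assoc]
      · -- distinct-position case
        simp only [if_neg hcur]
        have ihstep := ih (i + 1) (c ++ [points.getD i []])
          (by omega) (by omega) (by simp)
        rw [ihstep]
        have hsz : n - i = (n - (i + 1)) + 1 := by omega
        rw [hsz, List.range'_succ]
        have hkeep : pvKeep points i = true := by
          have h' : ¬ pvPos (points.getD i []) = pvPos (points.getD (i - 1) []) := by
            rw [hc] at hcur; exact hcur
          simp only [List.getD] at h'
          simp [pvKeep]
          exact Or.inl (Or.inl (Or.inr h'))
        simp [hkeep, List.append_assoc]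
    · rw [pvALoop, dif_neg hi]
      have h0 : points.length - i = 0 := by omega
      simp [h0]

-- ===== VERDICT (by name: the statement is the Claim_ definition above) =====
theorem collapse_stationary_py_spec : Claim_equal_collapse_stationary_py := by
  intro points _ _
  unfold Spec_collapse_stationary_py collapse_stationary_py collapse_stationary_py_alt
  by_cases hn : points.length ≤ 2
  · simp [hn]
  · simp only [if_neg hn]
    have h3 : 3 ≤ points.length := by omega
    rw [pvALoop_eq points points.length 1 [points.getD 0 []] (by omega) le_rfl (by simp)]
    have hr : List.range points.length = 0 :: List.range' 1 (points.length - 1) := by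
      rw [List.range_eq_range']
      have : points.length = 1 + (points.length - 1) := by omega
      rw [this, ← List.range'_append (s := 0) (m := 1) (n := points.length - 1) (step := 1)]
      simp [List.range'_one]
    rw [hr]
    have hk0 : pvKeep points 0 = true := by simp [pvKeep]
    simp [hk0]
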